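-- pv_equiv track=rewrite | github.com/ilyes-smaouii/advent_of_code_2024 | scripts/day_08.py | get_antinodes_set
-- ===== SOURCE A (Python) =====
-- def get_antenna_positions(char_table) :
--   row_count = len(char_table)
--   col_count = len(char_table[0])
--   antenna_positions = dict()
--   for row_idx in range(row_count) :
--     for col_idx in range(col_count) :
--       curr_char = char_table[row_idx][col_idx]
--       if curr_char == "." :
--         continue
--       if curr_char not in antenna_positions :
--         antenna_positions[curr_char] = set()
--       antenna_positions[curr_char].add((row_idx, col_idx))
--   return antenna_positions
--
-- def get_antinodes_set(char_table) :
--   row_count = len(char_table)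
--   col_count = len(char_table[0])
--   antenna_positions = get_antenna_positions(char_table)
--   antinodes_positions = set()
--   for row_idx in range(row_count) :
--     for col_idx in range(col_count) :
--       for antenna_type, positions in antenna_positions.items() :
--         for position_1 in positions :
--           for position_2 in positions :
--             row_diff_1 = position_1[0] - row_idx
--             col_diff_1 = position_1[1] - col_idx
--             row_diff_2 = position_2[0] - row_idx
--             col_diff_2 = position_2[1] - col_idx
--             if ((row_diff_1 == 2 * row_diff_2 and col_diff_1 == 2 * col_diff_2) \
--               or (row_diff_2 == 2 * row_diff_1 and col_diff_2 == 2 * col_diff_1)) \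
--                 and (row_diff_1 != 0 or col_diff_1 != 0) :
--               antinodes_positions.add((row_idx, col_idx))
--   return antinodes_positions
-- ===== SOURCE B (Python) =====
-- def get_antinodes_set(char_table):
--     row_count = len(char_table)
--     col_count = len(char_table[0])
--     positions_by_type = {}
--     for row_idx in range(row_count):
--         for col_idx in range(col_count):
--             ch = char_table[row_idx][col_idx]
--             if ch != ".":
--                 positions_by_type.setdefault(ch, []).append((row_idx, col_idx))
--     candidates = set()
--     for positions in positions_by_type.values():
--         for p1 in positions:
--             for p2 in positions:
--                 if p1 != p2:
--                     candidates.add((2 * p2[0] - p1[0], 2 * p2[1] - p1[1]))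
--     return {(r, c) for r in range(row_count) for c in range(col_count) if (r, c) in candidates}
-- ===== Notes on version B (the rewrite author's own statement) =====
-- stated objective: faster
-- what changed: Instead of testing every grid cell against every ordered antenna pair (A's O(R*C*N^2) scan), B computes each antinode candidate directly as 2*p2-p1 from the ordered antenna pairs once, and then keeps the in-grid candidates.
import Mathlib
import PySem

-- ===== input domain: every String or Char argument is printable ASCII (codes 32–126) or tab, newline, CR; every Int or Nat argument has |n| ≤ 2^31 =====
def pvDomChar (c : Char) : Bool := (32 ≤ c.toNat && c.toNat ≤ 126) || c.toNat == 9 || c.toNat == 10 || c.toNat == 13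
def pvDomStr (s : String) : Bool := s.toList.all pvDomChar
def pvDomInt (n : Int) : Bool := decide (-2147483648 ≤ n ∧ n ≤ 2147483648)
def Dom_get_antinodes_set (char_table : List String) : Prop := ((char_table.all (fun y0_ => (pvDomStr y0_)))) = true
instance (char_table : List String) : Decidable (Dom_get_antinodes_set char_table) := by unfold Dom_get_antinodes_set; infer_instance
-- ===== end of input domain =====

-- B computes each antinode candidate 2*p2-p1 directly from ordered antenna pairs and keeps the in-grid ones,
-- instead of A's per-cell scan over all antenna pairs; measurably faster (asymptotic: O(R*C+N^2) vs O(R*C*N^2)).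


-- ===== PORT A =====
-- char_table[row_idx][col_idx] is ported as a total lookup with defaults "" / ' ';
-- Pre_ keeps all indices in range, so the defaults are never read there (exact on Pre_).
def get_antenna_positions (char_table : List String) : PySem.Dict Char (PySem.Set (Int × Int)) :=
  let row_count : Int := char_table.length
  let col_count : Int := PySem.Str.len (PySem.List.pyGetD char_table 0 "")
  (PySem.List.pyRange 0 row_count 1).foldl (fun d row_idx =>
    (PySem.List.pyRange 0 col_count 1).foldl (fun d col_idx =>
      let curr_char := PySem.List.pyGetD (PySem.List.pyGetD char_table row_idx "").toList col_idx ' '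
      if curr_char == '.' then d
      else
        let d' := if d.contains curr_char then d else d.insert curr_char PySem.Set.empty
        -- antenna_positions[curr_char].add(...) : in-place set add = Dict.modify (key is present)
        d'.modify curr_char PySem.Set.empty (fun s => PySem.Set.add s (row_idx, col_idx))) d)
    PySem.Dict.empty

def get_antinodes_set (char_table : List String) : List (Int × Int) :=
  let row_count : Int := char_table.length
  let col_count : Int := PySem.Str.len (PySem.List.pyGetD char_table 0 "")
  let antenna_positions := get_antenna_positions char_table
  (PySem.List.pyRange 0 row_count 1).foldl (fun acc row_idx =>
    (PySem.List.pyRange 0 col_count 1).foldl (fun acc col_idx =>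
      antenna_positions.items.foldl (fun acc kv =>
        kv.2.foldl (fun acc position_1 =>
          kv.2.foldl (fun acc position_2 =>
            let row_diff_1 := position_1.1 - row_idx
            let col_diff_1 := position_1.2 - col_idx
            let row_diff_2 := position_2.1 - row_idx
            let col_diff_2 := position_2.2 - col_idx
            if ((row_diff_1 == 2 * row_diff_2 && col_diff_1 == 2 * col_diff_2)
                || (row_diff_2 == 2 * row_diff_1 && col_diff_2 == 2 * col_diff_1))
               && (row_diff_1 != 0 || col_diff_1 != 0)
            then PySem.Set.add acc (row_idx, col_idx) else acc) acc) acc) acc) acc)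
    (PySem.Set.empty : PySem.Set (Int × Int))

-- ===== PORT B =====
-- positions_by_type.setdefault(ch, []).append(pos) = Dict.modify ch [] (· ++ [pos])
def pvCollectPositions (char_table : List String) : PySem.Dict Char (List (Int × Int)) :=
  let row_count : Int := char_table.length
  let col_count : Int := PySem.Str.len (PySem.List.pyGetD char_table 0 "")
  (PySem.List.pyRange 0 row_count 1).foldl (fun d row_idx =>
    (PySem.List.pyRange 0 col_count 1).foldl (fun d col_idx =>
      let ch := PySem.List.pyGetD (PySem.List.pyGetD char_table row_idx "").toList col_idx ' '
      if ch != '.' then d.modify ch [] (fun l => l ++ [(row_idx, col_idx)]) else d) d)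
    PySem.Dict.empty

def get_antinodes_set_alt (char_table : List String) : List (Int × Int) :=
  let row_count : Int := char_table.length
  let col_count : Int := PySem.Str.len (PySem.List.pyGetD char_table 0 "")
  let positions_by_type := pvCollectPositions char_table
  let candidates : PySem.Set (Int × Int) :=
    positions_by_type.values.foldl (fun s positions =>
      positions.foldl (fun s p1 =>
        positions.foldl (fun s p2 =>
          if p1 != p2 then PySem.Set.add s (2 * p2.1 - p1.1, 2 * p2.2 - p1.2) else s) s) s)
      PySem.Set.empty
  (PySem.List.pyRange 0 row_count 1).foldl (fun acc r =>
    (PySem.List.pyRange 0 col_count 1).foldl (fun acc c =>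
      if candidates.contains (r, c) then PySem.Set.add acc (r, c) else acc) acc)
    (PySem.Set.empty : PySem.Set (Int × Int))

-- ===== PRECONDITION & SPEC =====
-- Pre_ excludes exactly the inputs where Python A raises an IndexError: the empty table
-- (char_table[0]) and tables with a row shorter than the first row (row[col_idx]).
def Pre_get_antinodes_set (char_table : List String) : Prop :=
  char_table ≠ [] ∧ ∀ s ∈ char_table, PySem.Str.len (PySem.List.pyGetD char_table 0 "") ≤ PySem.Str.len s
instance (char_table : List String) : Decidable (Pre_get_antinodes_set char_table) := by
  unfold Pre_get_antinodes_set; infer_instance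

def pvWitness_get_antinodes_set : List String := ["a.a.", ".b.b", "....", "a..b"]

def Spec_get_antinodes_set (char_table : List String) (out : List (Int × Int)) : Prop := out = get_antinodes_set_alt char_table
instance (char_table : List String) (out : List (Int × Int)) : Decidable (Spec_get_antinodes_set char_table out) := by unfold Spec_get_antinodes_set; infer_instance

-- ===== CLAIM (what is proved, stated in full; the proofs are below) =====
def Claim_equal_get_antinodes_set : Prop := ∀ (char_table : List String), Dom_get_antinodes_set char_table → Pre_get_antinodes_set char_table → Spec_get_antinodes_set char_table (get_antinodes_set char_table)

-- ===== LEMMAS AND PROOFS =====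


-- proof-only helpers: the grid cells in row-major order, the cell character, and the two loop bodies
def pvCh (ct : List String) (rc : Int × Int) : Char :=
  PySem.List.pyGetD (PySem.List.pyGetD ct rc.1 "").toList rc.2 ' '

def pvCells (R C : Int) : List (Int × Int) :=
  (PySem.List.pyRange 0 R 1).flatMap (fun r => (PySem.List.pyRange 0 C 1).map (fun c => (r, c)))

def pvStepA (ct : List String) (d : PySem.Dict Char (PySem.Set (Int × Int))) (rc : Int × Int) :
    PySem.Dict Char (PySem.Set (Int × Int)) :=
  let curr_char := pvCh ct rc
  if curr_char == '.' then d
  else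
    (if d.contains curr_char then d else d.insert curr_char []).modify curr_char []
      (fun s => PySem.Set.add s rc)

def pvStepB (ct : List String) (d : PySem.Dict Char (List (Int × Int))) (rc : Int × Int) :
    PySem.Dict Char (List (Int × Int)) :=
  let ch := pvCh ct rc
  if ch != '.' then d.modify ch [] (fun l => l ++ [rc]) else d

def pvCondB (rc p1 p2 : Int × Int) : Bool :=
  ((p1.1 - rc.1 == 2 * (p2.1 - rc.1) && p1.2 - rc.2 == 2 * (p2.2 - rc.2))
    || (p2.1 - rc.1 == 2 * (p1.1 - rc.1) && p2.2 - rc.2 == 2 * (p1.2 - rc.2)))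
  && (p1.1 - rc.1 != 0 || p1.2 - rc.2 != 0)

def pvMainStepA (items : List (Char × List (Int × Int))) (acc : PySem.Set (Int × Int)) (rc : Int × Int) :
    PySem.Set (Int × Int) :=
  items.foldl (fun acc kv =>
    kv.2.foldl (fun acc p1 =>
      kv.2.foldl (fun acc p2 =>
        if pvCondB rc p1 p2 then PySem.Set.add acc rc else acc) acc) acc) acc

def pvPred (items : List (Char × List (Int × Int))) (rc : Int × Int) : Bool :=
  items.any (fun kv => kv.2.any (fun p1 => kv.2.any (fun p2 => pvCondB rc p1 p2)))

def pvCand (d : PySem.Dict Char (List (Int × Int))) : PySem.Set (Int × Int) :=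
  d.values.foldl (fun s positions =>
    positions.foldl (fun s p1 =>
      positions.foldl (fun s p2 =>
        if p1 != p2 then PySem.Set.add s (2 * p2.1 - p1.1, 2 * p2.2 - p1.2) else s) s) s)
    PySem.Set.empty

-- a double loop over two ranges is a single loop over the (row, col) product list
theorem pv_foldl_prod {g : Type} (l1 l2 : List Int) (f : g → Int × Int → g) (init : g) :
    l1.foldl (fun d r => l2.foldl (fun d c => f d (r, c)) d) init
      = (l1.flatMap (fun r => l2.map (fun c => (r, c)))).foldl f init := by
  induction l1 generalizing init with
  | nil => simp
  | cons r t ih => simp [List.foldl_append, List.foldl_map, ih]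

theorem pv_A_dict_eq (ct : List String) :
    get_antenna_positions ct
      = (pvCells ct.length (PySem.Str.len (PySem.List.pyGetD ct 0 ""))).foldl (pvStepA ct) PySem.Dict.empty := by
  unfold get_antenna_positions pvCells
  exact pv_foldl_prod _ _ (pvStepA ct) PySem.Dict.empty

theorem pv_B_dict_eq (ct : List String) :
    pvCollectPositions ct
      = (pvCells ct.length (PySem.Str.len (PySem.List.pyGetD ct 0 ""))).foldl (pvStepB ct) PySem.Dict.empty := by
  unfold pvCollectPositions pvCells
  exact pv_foldl_prod _ _ (pvStepB ct) PySem.Dict.empty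

theorem pv_A_main_eq (ct : List String) :
    get_antinodes_set ct
      = (pvCells ct.length (PySem.Str.len (PySem.List.pyGetD ct 0 ""))).foldl
          (pvMainStepA (get_antenna_positions ct).items) PySem.Set.empty := by
  unfold get_antinodes_set pvCells
  exact pv_foldl_prod _ _ (pvMainStepA (get_antenna_positions ct).items) PySem.Set.empty

theorem pv_B_main_eq (ct : List String) :
    get_antinodes_set_alt ct
      = (pvCells ct.length (PySem.Str.len (PySem.List.pyGetD ct 0 ""))).foldl
          (fun acc rc => if (pvCand (pvCollectPositions ct)).contains rc then PySem.Set.add acc rc else acc)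
          PySem.Set.empty := by
  unfold get_antinodes_set_alt pvCells
  exact pv_foldl_prod _ _
    (fun acc rc => if (pvCand (pvCollectPositions ct)).contains rc then PySem.Set.add acc rc else acc)
    PySem.Set.empty

theorem pv_cells_nodup (R C : Int) : (pvCells R C).Nodup := by
  unfold pvCells
  rw [List.nodup_flatMap]
  constructor
  · intro r _
    exact (PySem.List.nodup_pyRange_one 0 C).map (fun a b h => by simpa using congrArg Prod.snd h)
  · have := PySem.List.pairwise_lt_pyRange_one 0 R
    refine this.imp ?_
    intro a b hab x hx hy
    simp only [List.mem_map] at hx hy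
    obtain ⟨c1, _, rfl⟩ := hx
    obtain ⟨c2, _, e⟩ := hy
    exact absurd (congrArg Prod.fst e).symm (by simp [hab.ne])

-- keys and values after one A-step / one B-step
theorem pv_stepA_keys (ct : List String) (d : PySem.Dict Char (PySem.Set (Int × Int))) (rc : Int × Int)
    (h : ¬ pvCh ct rc = '.') :
    (pvStepA ct d rc).keys = if d.contains (pvCh ct rc) then d.keys else d.keys ++ [pvCh ct rc] := by
  unfold pvStepA
  simp only [beq_iff_eq, if_neg h]
  by_cases hc : d.contains (pvCh ct rc) = true
  · rw [if_pos hc, if_pos hc, PySem.Dict.keys_modify, PySem.Dict.keys_insert_of_contains _ _ hc]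
  · rw [if_neg hc, if_neg (by simpa using hc), PySem.Dict.keys_modify,
      PySem.Dict.keys_insert_of_contains _ _ (PySem.Dict.contains_insert_self _ _ _),
      PySem.Dict.keys_insert_of_not_contains _ _ (by simpa using hc)]

theorem pv_stepA_getD (ct : List String) (d : PySem.Dict Char (PySem.Set (Int × Int))) (rc : Int × Int)
    (h : ¬ pvCh ct rc = '.') (k : Char) :
    (pvStepA ct d rc).getD k [] =
      if k = pvCh ct rc then PySem.Set.add (d.getD (pvCh ct rc) []) rc else d.getD k [] := by
  unfold pvStepA
  simp only [beq_iff_eq, if_neg h]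
  by_cases hc : d.contains (pvCh ct rc) = true
  · rw [if_pos hc, PySem.Dict.getD_modify]
  · rw [if_neg hc, PySem.Dict.getD_modify]
    rw [PySem.Dict.getD_of_not_contains d [] (by simpa using hc)]
    by_cases hk : k = pvCh ct rc
    · rw [if_pos hk, if_pos hk, PySem.Dict.getD_insert_self]
    · rw [if_neg hk, if_neg hk, PySem.Dict.getD_insert_of_ne _ _ _ hk]

theorem pv_stepB_keys (ct : List String) (d : PySem.Dict Char (List (Int × Int))) (rc : Int × Int)
    (h : ¬ pvCh ct rc = '.') :
    (pvStepB ct d rc).keys = if d.contains (pvCh ct rc) then d.keys else d.keys ++ [pvCh ct rc] := by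
  unfold pvStepB
  simp only [bne_iff_ne, ne_eq, if_pos h]
  by_cases hc : d.contains (pvCh ct rc) = true
  · rw [if_pos hc, PySem.Dict.keys_modify, PySem.Dict.keys_insert_of_contains _ _ hc]
  · rw [if_neg hc, PySem.Dict.keys_modify, PySem.Dict.keys_insert_of_not_contains _ _ (by simpa using hc)]

theorem pv_stepB_getD (ct : List String) (d : PySem.Dict Char (List (Int × Int))) (rc : Int × Int)
    (h : ¬ pvCh ct rc = '.') (k : Char) :
    (pvStepB ct d rc).getD k [] =
      if k = pvCh ct rc then d.getD (pvCh ct rc) [] ++ [rc] else d.getD k [] := by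
  unfold pvStepB
  simp only [bne_iff_ne, ne_eq, if_pos h]
  rw [PySem.Dict.getD_modify]

-- the two antenna dictionaries agree key by key (A adds each fresh cell to a set = appends to a list)
theorem pv_dict_rel (ct : List String) :
    ∀ (cells : List (Int × Int)) (d1 : PySem.Dict Char (PySem.Set (Int × Int)))
      (d2 : PySem.Dict Char (List (Int × Int))),
      cells.Nodup → d1.keys = d2.keys → (∀ k, d1.getD k [] = d2.getD k []) →
      (∀ k x, x ∈ d1.getD k [] → x ∉ cells) →
      (cells.foldl (pvStepA ct) d1).keys = (cells.foldl (pvStepB ct) d2).keys ∧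
        ∀ k, (cells.foldl (pvStepA ct) d1).getD k [] = (cells.foldl (pvStepB ct) d2).getD k [] := by
  intro cells
  induction cells with
  | nil => intro d1 d2 _ hk hg _; exact ⟨hk, hg⟩
  | cons rc rest ih =>
    intro d1 d2 hnd hk hg hfresh
    simp only [List.foldl_cons]
    by_cases hch : pvCh ct rc = '.'
    · have e1 : pvStepA ct d1 rc = d1 := by unfold pvStepA; simp [hch]
      have e2 : pvStepB ct d2 rc = d2 := by unfold pvStepB; simp [hch]
      rw [e1, e2]
      exact ih d1 d2 (List.Nodup.of_cons hnd) hk hg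
        (fun k x hx hm => hfresh k x hx (List.mem_cons_of_mem _ hm))
    · have hcont : d1.contains (pvCh ct rc) = d2.contains (pvCh ct rc) := by
        rw [PySem.Dict.contains_eq_decide_mem_keys, PySem.Dict.contains_eq_decide_mem_keys, hk]
      have hrc_new : rc ∉ d1.getD (pvCh ct rc) [] :=
        fun hmem => hfresh _ rc hmem List.mem_cons_self
      apply ih
      · exact List.Nodup.of_cons hnd
      · rw [pv_stepA_keys ct d1 rc hch, pv_stepB_keys ct d2 rc hch, hcont, hk]
      · intro k
        rw [pv_stepA_getD ct d1 rc hch, pv_stepB_getD ct d2 rc hch]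
        by_cases hkc : k = pvCh ct rc
        · rw [if_pos hkc, if_pos hkc, PySem.Set.add_of_not_mem hrc_new, hg]
        · rw [if_neg hkc, if_neg hkc, hg]
      · intro k x hx
        rw [pv_stepA_getD ct d1 rc hch] at hx
        by_cases hkc : k = pvCh ct rc
        · rw [if_pos hkc, PySem.Set.add_of_not_mem hrc_new] at hx
          rcases List.mem_append.mp hx with hx' | hx'
          · exact fun hm => hfresh _ x hx' (List.mem_cons_of_mem _ hm)
          · simp only [List.mem_singleton] at hx'
            subst hx'
            exact (List.nodup_cons.mp hnd).1
        · rw [if_neg hkc] at hx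
          exact fun hm => hfresh _ x hx (List.mem_cons_of_mem _ hm)

theorem pv_keysB_nodup (ct : List String) : (pvCollectPositions ct).keys.Nodup := by
  rw [pv_B_dict_eq]
  have e : ∀ (cells : List (Int × Int)) (d : PySem.Dict Char (List (Int × Int))),
      cells.foldl (pvStepB ct) d
        = (cells.filter (fun rc => pvCh ct rc != '.')).foldl
            (fun d rc => d.modify (pvCh ct rc) [] (fun l => l ++ [rc])) d := by
    intro cells d
    rw [← PySem.List.foldl_if_eq_foldl_filter (fun rc => pvCh ct rc != '.')
      (fun d rc => d.modify (pvCh ct rc) [] (fun l => l ++ [rc])) cells d]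
    rfl
  rw [e]
  exact PySem.Dict.nodup_keys_foldl_modify_key _ (fun rc => pvCh ct rc) []
    (fun _ rc => fun l => l ++ [rc]) _ PySem.Dict.nodup_keys_empty

theorem pv_dicts_eq (ct : List String) : get_antenna_positions ct = pvCollectPositions ct := by
  have h := pv_dict_rel ct (pvCells ct.length (PySem.Str.len (PySem.List.pyGetD ct 0 "")))
    PySem.Dict.empty PySem.Dict.empty (pv_cells_nodup _ _) (by simp)
    (fun k => by simp [PySem.Dict.getD_empty])
    (fun k x hx => by simp [PySem.Dict.getD_empty] at hx)
  rw [← pv_A_dict_eq, ← pv_B_dict_eq] at h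
  obtain ⟨hk, hg⟩ := h
  have nB := pv_keysB_nodup ct
  have nA : (get_antenna_positions ct).keys.Nodup := hk ▸ nB
  apply PySem.Dict.ext
  rw [PySem.Dict.items_eq_map_keys _ nA [], PySem.Dict.items_eq_map_keys _ nB [], hk]
  exact List.map_congr_left (fun k _ => by rw [hg k])

-- a loop that conditionally adds one fixed element a is 'if any then add a'
theorem pv_foldl_condAdd {a b : Type} [BEq b] [LawfulBEq b] (p : a → Bool) (e : b) :
    ∀ (l : List a) (s : PySem.Set b),
      List.foldl (fun s x => if p x then PySem.Set.add s e else s) s l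
        = if l.any p then PySem.Set.add s e else s := by
  intro l
  induction l with
  | nil => intro s; simp
  | cons x t ih =>
    intro s
    cases hp : p x with
    | false => simp [hp, ih]
    | true =>
      simp [hp, ih]

theorem pv_mainA_eq (items : List (Char × List (Int × Int))) (rc : Int × Int)
    (acc : PySem.Set (Int × Int)) :
    pvMainStepA items acc rc = if pvPred items rc then PySem.Set.add acc rc else acc := by
  unfold pvMainStepA pvPred
  simp only [pv_foldl_condAdd]

theorem pv_mem_foldl {a b : Type} (step : List b → a → List b) (P : a → b → Prop)
    (h : ∀ s x y, y ∈ step s x ↔ y ∈ s ∨ P x y) :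
    ∀ (l : List a) (s : List b) (y : b), y ∈ l.foldl step s ↔ y ∈ s ∨ ∃ x ∈ l, P x y := by
  intro l
  induction l with
  | nil => intro s y; simp
  | cons x t ih =>
    intro s y
    rw [List.foldl_cons, ih, h]
    simp only [List.mem_cons]
    constructor
    · rintro ((hy | hp) | ⟨z, hz, hpz⟩)
      · exact Or.inl hy
      · exact Or.inr ⟨x, Or.inl rfl, hp⟩
      · exact Or.inr ⟨z, Or.inr hz, hpz⟩
    · rintro (hy | ⟨z, (rfl | hz), hpz⟩)
      · exact Or.inl (Or.inl hy)
      · exact Or.inl (Or.inr hpz)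
      · exact Or.inr ⟨z, hz, hpz⟩

theorem pv_mem_inner (v : List (Int × Int)) (p1 : Int × Int) (s : List (Int × Int)) (y : Int × Int) :
    y ∈ v.foldl (fun s p2 => if p1 != p2 then PySem.Set.add s (2 * p2.1 - p1.1, 2 * p2.2 - p1.2) else s) s
      ↔ y ∈ s ∨ ∃ p2 ∈ v, p1 ≠ p2 ∧ y = (2 * p2.1 - p1.1, 2 * p2.2 - p1.2) := by
  refine pv_mem_foldl
    (fun s p2 => if p1 != p2 then PySem.Set.add s (2 * p2.1 - p1.1, 2 * p2.2 - p1.2) else s)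
    (fun p2 y => p1 ≠ p2 ∧ y = (2 * p2.1 - p1.1, 2 * p2.2 - p1.2)) ?_ v s y
  intro s p2 y
  by_cases h : p1 = p2
  · simp [h]
  · simp [h, PySem.Set.mem_add]

theorem pv_mem_mid (v : List (Int × Int)) (s : List (Int × Int)) (y : Int × Int) :
    y ∈ v.foldl (fun s p1 =>
        v.foldl (fun s p2 => if p1 != p2 then PySem.Set.add s (2 * p2.1 - p1.1, 2 * p2.2 - p1.2) else s) s) s
      ↔ y ∈ s ∨ ∃ p1 ∈ v, ∃ p2 ∈ v, p1 ≠ p2 ∧ y = (2 * p2.1 - p1.1, 2 * p2.2 - p1.2) := by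
  refine pv_mem_foldl
    (fun s p1 =>
      v.foldl (fun s p2 => if p1 != p2 then PySem.Set.add s (2 * p2.1 - p1.1, 2 * p2.2 - p1.2) else s) s)
    (fun p1 y => ∃ p2 ∈ v, p1 ≠ p2 ∧ y = (2 * p2.1 - p1.1, 2 * p2.2 - p1.2)) ?_ v s y
  intro s p1 y
  exact pv_mem_inner v p1 s y

theorem pv_mem_cand (d : PySem.Dict Char (List (Int × Int))) (y : Int × Int) :
    y ∈ pvCand d ↔ ∃ v ∈ d.values, ∃ p1 ∈ v, ∃ p2 ∈ v,
      p1 ≠ p2 ∧ y = (2 * p2.1 - p1.1, 2 * p2.2 - p1.2) := by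
  unfold pvCand
  rw [pv_mem_foldl _ (fun v y => ∃ p1 ∈ v, ∃ p2 ∈ v, p1 ≠ p2 ∧ y = (2 * p2.1 - p1.1, 2 * p2.2 - p1.2))
    (fun s v y => pv_mem_mid v s y) d.values PySem.Set.empty y]
  simp [PySem.Set.empty]

-- cell rc is an antinode for A's per-cell test iff it is one of B's computed candidates
theorem pv_pred_eq_contains (d : PySem.Dict Char (List (Int × Int))) (rc : Int × Int) :
    pvPred d.items rc = (pvCand d).contains rc := by
  rw [Bool.eq_iff_iff, PySem.Set.contains_iff, pv_mem_cand]
  unfold pvPred pvCondB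
  simp only [List.any_eq_true, Bool.and_eq_true, Bool.or_eq_true, beq_iff_eq, bne_iff_ne, ne_eq,
    PySem.Dict.values, List.mem_map]
  constructor
  · rintro ⟨kv, hkv, p1, hp1, p2, hp2, hor, hguard⟩
    rcases hor with ⟨h1, h2⟩ | ⟨h1, h2⟩
    · refine ⟨kv.2, ⟨kv, hkv, rfl⟩, p1, hp1, p2, hp2, ?_, ?_⟩
      · intro he; rw [he] at h1 h2 hguard; rcases hguard with hg | hg <;> omega
      · refine Prod.ext ?_ ?_ <;> dsimp only <;> omega
    · refine ⟨kv.2, ⟨kv, hkv, rfl⟩, p2, hp2, p1, hp1, ?_, ?_⟩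
      · intro he; rw [he] at h1 h2; rcases hguard with hg | hg <;> omega
      · refine Prod.ext ?_ ?_ <;> dsimp only <;> omega
  · rintro ⟨v, ⟨kv, hkv, rfl⟩, p1, hp1, p2, hp2, hne, heq⟩
    have e1 : rc.1 = 2 * p2.1 - p1.1 := by rw [heq]
    have e2 : rc.2 = 2 * p2.2 - p1.2 := by rw [heq]
    have hne' : p1.1 ≠ p2.1 ∨ p1.2 ≠ p2.2 :=
      not_and_or.mp (fun hc => hne (Prod.ext hc.1 hc.2))
    refine ⟨kv, hkv, p1, hp1, p2, hp2, Or.inl ⟨by omega, by omega⟩, ?_⟩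
    rcases hne' with h | h
    · exact Or.inl (by omega)
    · exact Or.inr (by omega)

-- ===== VERDICT (by name: the statement is the Claim_ definition above) =====
theorem get_antinodes_set_spec : Claim_equal_get_antinodes_set := by
  intro ct _ _
  show get_antinodes_set ct = get_antinodes_set_alt ct
  rw [pv_A_main_eq, pv_B_main_eq, pv_dicts_eq]
  apply PySem.List.foldl_congr_mem
  intro acc rc _
  rw [pv_mainA_eq, pv_pred_eq_contains]
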